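-- pv_equiv track=rewrite | github.com/lrcortizo/py-vgene-classifier | scripts/02_download_background.py | extract_peptides_from_protein
-- ===== SOURCE A (Python) =====
-- def extract_peptides_from_protein(protein_seq, min_len, max_len):
--     """Extract peptides of target length from a protein sequence"""
--     peptides = []
--     protein_str = str(protein_seq)
--
--     # Split by stop codons
--     fragments = protein_str.split("*")
--
--     # For each fragment, extract windows of target size
--     for fragment in fragments:
--         if len(fragment) >= min_len:
--             # Extract all possible windows
--             for i in range(len(fragment) - min_len + 1):
--                 for target_len in range(
--                     min_len, min(max_len + 1, len(fragment) - i + 1)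
--                 ):
--                     peptide = fragment[i : i + target_len]
--                     if min_len <= len(peptide) <= max_len:
--                         # Check if it doesn't have weird characters
--                         if all(aa in "ACDEFGHIKLMNPQRSTVWY" for aa in peptide):
--                             peptides.append(peptide)
--
--     return peptides
-- ===== SOURCE B (Python) =====
-- def extract_peptides_from_protein(protein_seq, min_len, max_len):
--     """Extract peptides of target length from a protein sequence.
--
--     One backward pass per fragment precomputes, for every position, the
--     length of the maximal run of valid amino acids starting there; windows
--     are then emitted directly without re-checking characters."""
--     valid = set("ACDEFGHIKLMNPQRSTVWY")
--     peptides = []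
--     if max_len < min_len:
--         return peptides
--     for fragment in str(protein_seq).split("*"):
--         n = len(fragment)
--         if n < min_len:
--             continue
--         # run[i] = length of the maximal run of valid characters starting at i
--         run = [0]
--         for ch in reversed(fragment):
--             run.append(run[-1] + 1 if ch in valid else 0)
--         run.reverse()
--         for i in range(n - min_len + 1):
--             for length in range(min_len, min(max_len, run[i]) + 1):
--                 peptides.append(fragment[i:i + length])
--     return peptides
-- ===== Notes on version B (the rewrite author's own statement) =====
-- stated objective: faster
-- what changed: B precomputes, in one backward pass per fragment, the length of the maximal valid-amino-acid run starting at each position, and then emits each window directly from a clipped length range, eliminating A's per-window all()-character recheck.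
-- outside the precondition, e.g. on extract_peptides_from_protein('A', -1, 2): A returns ['', '', 'A', '', '', ''], B raises IndexError
import Mathlib
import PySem

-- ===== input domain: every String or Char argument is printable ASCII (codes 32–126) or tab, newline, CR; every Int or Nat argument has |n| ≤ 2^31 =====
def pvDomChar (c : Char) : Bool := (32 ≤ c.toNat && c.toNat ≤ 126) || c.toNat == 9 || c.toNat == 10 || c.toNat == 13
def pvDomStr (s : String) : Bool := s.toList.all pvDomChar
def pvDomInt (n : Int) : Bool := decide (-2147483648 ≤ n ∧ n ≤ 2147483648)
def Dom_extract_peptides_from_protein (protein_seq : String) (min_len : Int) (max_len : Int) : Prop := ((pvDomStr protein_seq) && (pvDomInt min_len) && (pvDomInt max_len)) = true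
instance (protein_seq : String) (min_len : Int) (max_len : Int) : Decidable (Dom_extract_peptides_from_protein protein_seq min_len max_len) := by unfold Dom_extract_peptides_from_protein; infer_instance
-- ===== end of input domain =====

-- B replaces A's per-window character recheck by a per-fragment backward pass that
-- precomputes the maximal valid-run length at each position (objective: faster, constant factor).

-- the valid amino-acid alphabet (shared literal of both Pythons)
def pvValid : List Char := "ACDEFGHIKLMNPQRSTVWY".toList

-- ===== PORT A =====
def extract_peptides_from_protein (protein_seq : String) (min_len : Int) (max_len : Int) : List String :=
  let protein_str := protein_seq
  let fragments := (PySem.Str.split? protein_str "*").getD []   -- sep "*" ≠ "" : split? is always some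
  fragments.foldl (fun peptides fragment =>
    if min_len ≤ PySem.Str.len fragment then
      (PySem.List.pyRange 0 (PySem.Str.len fragment - min_len + 1) 1).foldl
        (fun peptides i =>
          (PySem.List.pyRange min_len (min (max_len + 1) (PySem.Str.len fragment - i + 1)) 1).foldl
            (fun peptides target_len =>
              let peptide := PySem.Str.slice fragment (some i) (some (i + target_len))
              if min_len ≤ PySem.Str.len peptide ∧ PySem.Str.len peptide ≤ max_len then
                if peptide.toList.all (fun aa => PySem.Chars.isIn [aa] pvValid) then
                  peptides ++ [peptide]
                else peptides
              else peptides)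
            peptides)
        peptides
    else peptides) []

-- ===== PORT B =====
def extract_peptides_from_protein_alt (protein_seq : String) (min_len : Int) (max_len : Int) : List String :=
  if max_len < min_len then []   -- no target length exists: emit nothing
  else
  let fragments := (PySem.Str.split? protein_seq "*").getD []
  fragments.foldl (fun peptides fragment =>
    let n := PySem.Str.len fragment
    if n < min_len then peptides   -- 'continue'
    else
      -- run[i] = length of the maximal run of valid characters starting at i
      let run := (fragment.toList.reverse.foldl
        (fun run ch =>
          run ++ [if PySem.Chars.isIn [ch] pvValid then PySem.List.pyGetD run (-1) 0 + 1 else 0])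
        [(0 : Int)]).reverse
      (PySem.List.pyRange 0 (n - min_len + 1) 1).foldl
        (fun peptides i =>
          (PySem.List.pyRange min_len (min max_len (PySem.List.pyGetD run i 0) + 1) 1).foldl
            (fun peptides length =>
              peptides ++ [PySem.Str.slice fragment (some i) (some (i + length))])
            peptides)
        peptides) []

-- ===== PRECONDITION & SPEC =====
-- Pre_ excludes negative min_len, outside the task's natural domain: there A's negative window
-- lengths reach Python's negative-slice wraparound while B's run table is indexed past its end
-- and raises IndexError.
def Pre_extract_peptides_from_protein (protein_seq : String) (min_len : Int) (max_len : Int) : Prop := 0 ≤ min_len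
instance (protein_seq : String) (min_len : Int) (max_len : Int) : Decidable (Pre_extract_peptides_from_protein protein_seq min_len max_len) := by unfold Pre_extract_peptides_from_protein; infer_instance

def pvWitness_extract_peptides_from_protein : String × Int × Int := ("MA*KLVG", 2, 3)

def Spec_extract_peptides_from_protein (protein_seq : String) (min_len : Int) (max_len : Int) (out : List String) : Prop := out = extract_peptides_from_protein_alt protein_seq min_len max_len
instance (protein_seq : String) (min_len : Int) (max_len : Int) (out : List String) : Decidable (Spec_extract_peptides_from_protein protein_seq min_len max_len out) := by unfold Spec_extract_peptides_from_protein; infer_instance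

-- ===== CLAIM (what is proved, stated in full; the proofs are below) =====
def Claim_equal_extract_peptides_from_protein : Prop := ∀ (protein_seq : String) (min_len : Int) (max_len : Int), Dom_extract_peptides_from_protein protein_seq min_len max_len → Pre_extract_peptides_from_protein protein_seq min_len max_len → Spec_extract_peptides_from_protein protein_seq min_len max_len (extract_peptides_from_protein protein_seq min_len max_len)

-- ===== LEMMAS AND PROOFS =====

-- clean model of B's run table: v cs = length of the maximal valid prefix of cs
def pvRun (cs : List Char) : Nat :=
  match cs with
  | [] => 0
  | c :: t => if PySem.Chars.isIn [c] pvValid then pvRun t + 1 else 0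

theorem pvRun_le_length (cs : List Char) : pvRun cs ≤ cs.length := by
  induction cs with
  | nil => simp [pvRun]
  | cons c t ih => simp only [pvRun, List.length_cons]; split <;> omega

-- the all-valid check on a prefix is exactly a bound against pvRun
theorem all_take_eq (cs : List Char) (L : Nat) (hL : L ≤ cs.length) :
    ((cs.take L).all (fun aa => PySem.Chars.isIn [aa] pvValid)) = decide (L ≤ pvRun cs) := by
  induction cs generalizing L with
  | nil =>
    have hl0 : L = 0 := by simpa using hL
    subst hl0; simp
  | cons c t ih =>
    cases L with
    | zero => simp
    | succ L =>
      simp only [List.take_succ_cons, List.all_cons, pvRun]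
      by_cases hc : PySem.Chars.isIn [c] pvValid = true
      · simp only [hc, Bool.true_and, if_true]
        rw [ih L (by simpa using hL)]
        simp only [decide_eq_decide]; omega
      · simp only [Bool.not_eq_true] at hc
        simp [hc]

-- B's foldr-built run table, read at index i, is pvRun of the i-th suffix
def pvRunList (cs : List Char) : List Int :=
  cs.foldr (fun ch run =>
    (if PySem.Chars.isIn [ch] pvValid then PySem.List.pyGetD run 0 0 + 1 else 0) :: run) [(0 : Int)]

theorem pyGetD_zero_cons (x : Int) (xs : List Int) : PySem.List.pyGetD (x :: xs) 0 0 = x := by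
  rw [show (0:Int) = ((0:Nat):Int) by simp, PySem.List.pyGetD_natCast]
  rfl

theorem pvRunList_head (cs : List Char) : PySem.List.pyGetD (pvRunList cs) 0 0 = (pvRun cs : Int) := by
  cases cs with
  | nil =>
    rw [show pvRunList [] = [(0:Int)] from rfl, pyGetD_zero_cons]
    simp [pvRun]
  | cons c t =>
    simp only [pvRunList, List.foldr_cons, pvRun]
    have h : PySem.List.pyGetD (pvRunList t) 0 0 = (pvRun t : Int) := pvRunList_head t
    simp only [pvRunList] at h
    rw [pyGetD_zero_cons]
    split <;> simp [h]

theorem pvRunList_getD (cs : List Char) (i : Nat) (hi : i ≤ cs.length) :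
    PySem.List.pyGetD (pvRunList cs) (i : Int) 0 = (pvRun (cs.drop i) : Int) := by
  induction cs generalizing i with
  | nil =>
    have h0 : i = 0 := by simpa using hi
    subst h0
    simpa using pvRunList_head []
  | cons c t ih =>
    cases i with
    | zero => simpa using pvRunList_head (c :: t)
    | succ i =>
      have ht : PySem.List.pyGetD (pvRunList t) (i : Int) 0 = (pvRun (t.drop i) : Int) :=
        ih i (by simpa using hi)
      simp only [pvRunList, List.foldr_cons, List.drop_succ_cons]
      rw [PySem.List.pyGetD_natCast] at ht ⊢
      simpa using ht

-- filtering an integer range by an upper bound clips the range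
theorem filter_pyRange_le (w : Int) : ∀ (a b : Int),
    (PySem.List.pyRange a b 1).filter (fun L => decide (L ≤ w)) = PySem.List.pyRange a (min b (w + 1)) 1 := by
  intro a b
  by_cases hab : b ≤ a
  · rw [PySem.List.pyRange_one_eq_nil hab, PySem.List.pyRange_one_eq_nil (by omega)]
    rfl
  · have hab' : a < b := by omega
    have : ((b - (a + 1)).toNat) < (b - a).toNat := by omega
    rw [PySem.List.pyRange_one_cons hab']
    by_cases haw : a ≤ w
    · rw [List.filter_cons_of_pos (by simpa using haw), filter_pyRange_le w (a + 1) b]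
      conv_rhs => rw [PySem.List.pyRange_one_cons (by omega)]
    · rw [List.filter_cons_of_neg (by simpa using haw), filter_pyRange_le w (a + 1) b,
        PySem.List.pyRange_one_eq_nil (by omega), PySem.List.pyRange_one_eq_nil (by omega)]
termination_by a b => (b - a).toNat
decreasing_by all_goals omega

-- the innermost A-loop in flatMap form
theorem innerA_eq (f : String) (m M i : Int) (acc : List String)
    (hi : 0 ≤ i) :
    (PySem.List.pyRange m (min (M + 1) (PySem.Str.len f - i + 1)) 1).foldl
      (fun peptides target_len =>
        let peptide := PySem.Str.slice f (some i) (some (i + target_len))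
        if m ≤ PySem.Str.len peptide ∧ PySem.Str.len peptide ≤ M then
          if peptide.toList.all (fun aa => PySem.Chars.isIn [aa] pvValid) then
            peptides ++ [peptide]
          else peptides
        else peptides)
      acc
    = acc ++ ((PySem.List.pyRange m (min (M + 1) (PySem.Str.len f - i + 1)) 1).filter
        (fun target_len =>
          let peptide := PySem.Str.slice f (some i) (some (i + target_len))
          decide (m ≤ PySem.Str.len peptide ∧ PySem.Str.len peptide ≤ M) &&
            peptide.toList.all (fun aa => PySem.Chars.isIn [aa] pvValid))).map
        (fun target_len => PySem.Str.slice f (some i) (some (i + target_len))) := by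
  rw [← PySem.List.foldl_append_if]
  apply PySem.List.foldl_congr_mem
  intro a L _
  by_cases h1 : m ≤ PySem.Str.len (PySem.Str.slice f (some i) (some (i + L))) ∧
      PySem.Str.len (PySem.Str.slice f (some i) (some (i + L))) ≤ M <;>
    cases h2 : (PySem.Str.slice f (some i) (some (i + L))).toList.all
        (fun aa => PySem.Chars.isIn [aa] pvValid) <;>
      simp [h1, h2, ite_and]

-- per start index i: A's checked inner loop equals B's clipped inner loop
theorem perI_eq (f : String) (m M i : Int) (hm : 0 ≤ m) (hi : 0 ≤ i)
    (him : i + m ≤ PySem.Str.len f) (acc : List String) :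
    (PySem.List.pyRange m (min (M + 1) (PySem.Str.len f - i + 1)) 1).foldl
      (fun peptides target_len =>
        let peptide := PySem.Str.slice f (some i) (some (i + target_len))
        if m ≤ PySem.Str.len peptide ∧ PySem.Str.len peptide ≤ M then
          if peptide.toList.all (fun aa => PySem.Chars.isIn [aa] pvValid) then
            peptides ++ [peptide]
          else peptides
        else peptides)
      acc
    = (PySem.List.pyRange m (min M (PySem.List.pyGetD (pvRunList f.toList) i 0) + 1) 1).foldl
      (fun peptides length =>
        peptides ++ [PySem.Str.slice f (some i) (some (i + length))])
      acc := by
  have hn : PySem.Str.len f = (f.toList.length : Int) := PySem.Str.len_eq f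
  have hin : i.toNat ≤ f.toList.length := by omega
  have hw : PySem.List.pyGetD (pvRunList f.toList) i 0 = (pvRun (f.toList.drop i.toNat) : Int) := by
    rw [show i = ((i.toNat : Nat) : Int) by omega]
    exact pvRunList_getD f.toList i.toNat hin
  have hwle : pvRun (f.toList.drop i.toNat) ≤ f.toList.length - i.toNat :=
    le_trans (pvRun_le_length _) (by simp)
  rw [innerA_eq f m M i acc hi, PySem.List.foldl_append_singleton_eq_map]
  congr 1
  rw [List.filter_congr (q := fun L => decide (L ≤ (pvRun (f.toList.drop i.toNat) : Int)))]
  · rw [filter_pyRange_le, hw]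
    have hmin : min (min (M + 1) (PySem.Str.len f - i + 1)) ((pvRun (f.toList.drop i.toNat) : Int) + 1)
        = min M (pvRun (f.toList.drop i.toNat) : Int) + 1 := by omega
    rw [hmin]
  · intro L hL
    rw [PySem.List.mem_pyRange_one] at hL
    have hLm : m ≤ L := hL.1
    have hLM : L ≤ M := by omega
    have hLn : L ≤ PySem.Str.len f - i := by omega
    have hpl : (PySem.Str.slice f (some i) (some (i + L))).toList
        = (f.toList.drop i.toNat).take L.toNat := by
      rw [PySem.Str.toList_slice, PySem.Chars.slice_eq_listSlice,
        PySem.List.slice_toNat f.toList hi (by omega)]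
      congr 1
      omega
    have hlen : PySem.Str.len (PySem.Str.slice f (some i) (some (i + L)))
        = L := by
      rw [PySem.Str.len_eq, hpl]
      simp only [List.length_take, List.length_drop]
      omega
    simp only [hlen, hpl]
    rw [all_take_eq (f.toList.drop i.toNat) L.toNat (by rw [List.length_drop]; omega)]
    have h1 : (m ≤ L ∧ L ≤ M) := ⟨hLm, hLM⟩
    simp only [h1, and_self, decide_true, Bool.true_and, decide_eq_decide]
    omega

-- B's append-and-reverse run construction builds pvRunList
theorem pvRevBuild (cs : List Char) :
    (cs.reverse.foldl
      (fun run ch =>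
        run ++ [if PySem.Chars.isIn [ch] pvValid then PySem.List.pyGetD run (-1) 0 + 1 else 0])
      [(0 : Int)]).reverse = pvRunList cs := by
  induction cs with
  | nil => rfl
  | cons c t ih =>
    rw [List.reverse_cons, List.foldl_concat, List.reverse_append]
    obtain ⟨x, r, hx⟩ : ∃ x r, pvRunList t = x :: r := by
      cases t <;> exact ⟨_, _, rfl⟩
    have hrev : t.reverse.foldl
        (fun run ch =>
          run ++ [if PySem.Chars.isIn [ch] pvValid then PySem.List.pyGetD run (-1) 0 + 1 else 0])
        [(0 : Int)] = (pvRunList t).reverse := by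
      rw [← ih, List.reverse_reverse]
    rw [hrev, hx]
    have hlast : PySem.List.pyGetD ((x :: r).reverse) (-1) 0 = x := by
      rw [List.reverse_cons]
      simp [PySem.List.pyGetD, PySem.List.pyGet?_neg_one_append_singleton]
    rw [hlast]
    have hhead : PySem.List.pyGetD (pvRunList t) 0 0 = x := by
      rw [hx, pyGetD_zero_cons]
    show _ = pvRunList (c :: t)
    simp only [pvRunList, List.foldr_cons]
    rw [show (List.foldr (fun ch run => (if PySem.Chars.isIn [ch] pvValid = true then PySem.List.pyGetD run 0 0 + 1 else 0) :: run) [(0:Int)] t) = pvRunList t from rfl, hhead, hx]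
    simp

-- per fragment: A's gated loop equals B's
theorem perFrag_eq (m M : Int) (hm : 0 ≤ m) (f : String) (acc : List String) :
    (if m ≤ PySem.Str.len f then
      (PySem.List.pyRange 0 (PySem.Str.len f - m + 1) 1).foldl
        (fun peptides i =>
          (PySem.List.pyRange m (min (M + 1) (PySem.Str.len f - i + 1)) 1).foldl
            (fun peptides target_len =>
              let peptide := PySem.Str.slice f (some i) (some (i + target_len))
              if m ≤ PySem.Str.len peptide ∧ PySem.Str.len peptide ≤ M then
                if peptide.toList.all (fun aa => PySem.Chars.isIn [aa] pvValid) then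
                  peptides ++ [peptide]
                else peptides
              else peptides)
            peptides)
        acc
    else acc)
    = (if PySem.Str.len f < m then acc
      else
        let run := (f.toList.reverse.foldl
          (fun run ch =>
            run ++ [if PySem.Chars.isIn [ch] pvValid then PySem.List.pyGetD run (-1) 0 + 1 else 0])
          [(0 : Int)]).reverse
        (PySem.List.pyRange 0 (PySem.Str.len f - m + 1) 1).foldl
          (fun peptides i =>
            (PySem.List.pyRange m (min M (PySem.List.pyGetD run i 0) + 1) 1).foldl
              (fun peptides length =>
                peptides ++ [PySem.Str.slice f (some i) (some (i + length))])
              peptides)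
          acc) := by
  have hrun : (f.toList.reverse.foldl
      (fun run ch =>
        run ++ [if PySem.Chars.isIn [ch] pvValid then PySem.List.pyGetD run (-1) 0 + 1 else 0])
      [(0 : Int)]).reverse = pvRunList f.toList := pvRevBuild f.toList
  by_cases h : m ≤ PySem.Str.len f
  · rw [if_pos h, if_neg (by omega)]
    rw [hrun]
    apply PySem.List.foldl_congr_mem
    intro a i hi
    rw [PySem.List.mem_pyRange_one] at hi
    exact perI_eq f m M i hm hi.1 (by omega) a
  · rw [if_neg h, if_pos (by omega)]

-- ===== VERDICT (by name: the statement is the Claim_ definition above) =====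
theorem foldl_keep {A B : Type} (l : List B) (acc : A) : l.foldl (fun a (_ : B) => a) acc = acc := by
  induction l generalizing acc <;> simp_all

-- when min_len > max_len, A's inner length range is empty and A returns []
theorem extractA_nil (s : String) (m M : Int) (hMm : M < m) :
    extract_peptides_from_protein s m M = [] := by
  unfold extract_peptides_from_protein
  show List.foldl _ [] ((PySem.Str.split? s "*").getD []) = []
  generalize (PySem.Str.split? s "*").getD [] = fs
  rw [PySem.List.foldl_congr_mem fs _ (fun a (_ : String) => a) [] ?_, foldl_keep]
  intro acc f _
  rw [PySem.List.foldl_congr_mem _ _ (fun a (_ : Int) => a) acc ?_, foldl_keep]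
  · split <;> rfl
  · intro a i _
    rw [PySem.List.pyRange_one_eq_nil (by omega)]
    rfl

theorem extract_peptides_from_protein_spec : Claim_equal_extract_peptides_from_protein := by
  intro protein_seq min_len max_len _ hpre
  unfold Spec_extract_peptides_from_protein
  by_cases hMm : max_len < min_len
  · rw [extractA_nil protein_seq min_len max_len hMm]
    unfold extract_peptides_from_protein_alt
    rw [if_pos hMm]
  · unfold extract_peptides_from_protein extract_peptides_from_protein_alt
    rw [if_neg hMm]
    apply PySem.List.foldl_congr_mem
    intro acc f _
    exact perFrag_eq min_len max_len hpre f acc
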